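-- pv_equiv track=rewrite | github.com/sangramch/Radioactive-Games | frbdn_mod.py | user_check
-- ===== SOURCE A (Python) =====
-- def user_check(user_val):
--      numlist=['1','2','3','4','5','6','7','8','9','0']
--      alphalist=['A','B','C','D','E','F','G','H','I','J','K','L','M','N','O','P','Q','R','S','T','U','V','W','X','Y','Z']
--      alphalist2=['a','b','c','d','e','f','g','h','i','j','k','l','m','n','o','p','q','r','s','t','u','v','w','x','y','z']
--      for i in range (len(user_val)):
--           if (user_val[i] not in alphalist2) or (user_val[i] in alphalist) or (user_val[i] in numlist):
--                return False
--
--      else: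
--           return True
-- ===== SOURCE B (Python) =====
-- def user_check(user_val):
--     if not user_val:
--         return True
--     return 'a' <= min(user_val) and max(user_val) <= 'z'
-- ===== Notes on version B (the rewrite author's own statement) =====
-- stated objective: alternative
-- what changed: Replaces A's per-character loop with three list-membership tests each by two aggregate passes (built-in min and max of the string) followed by a single interval comparison against the alphabet bounds; correct because every character is a lowercase letter iff both extrema are.
import Mathlib
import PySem

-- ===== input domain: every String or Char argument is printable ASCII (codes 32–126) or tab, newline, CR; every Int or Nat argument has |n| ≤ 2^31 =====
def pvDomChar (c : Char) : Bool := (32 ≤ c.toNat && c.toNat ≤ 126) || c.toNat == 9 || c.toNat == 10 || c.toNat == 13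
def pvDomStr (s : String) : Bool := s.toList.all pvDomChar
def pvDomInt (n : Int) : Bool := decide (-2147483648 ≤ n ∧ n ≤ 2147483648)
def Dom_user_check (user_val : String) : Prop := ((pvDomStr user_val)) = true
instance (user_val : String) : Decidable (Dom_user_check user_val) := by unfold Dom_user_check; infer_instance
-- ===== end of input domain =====

-- B replaces A's per-character membership loop with two aggregate passes:
-- min and max of the string, then a single interval comparison against 'a'/'z' (alternative decomposition).


-- ===== PORT A =====
def pvNumlist : List Char := ['1','2','3','4','5','6','7','8','9','0']
def pvAlphalist : List Char :=
  ['A','B','C','D','E','F','G','H','I','J','K','L','M','N','O','P','Q','R','S','T','U','V','W','X','Y','Z']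
def pvAlphalist2 : List Char :=
  ['a','b','c','d','e','f','g','h','i','j','k','l','m','n','o','p','q','r','s','t','u','v','w','x','y','z']

-- the 'for i in range(len(user_val))' loop with its early 'return False'
def userCheckLoopA : List Char → Bool
  | [] => true
  | c :: rest =>
      if (!pvAlphalist2.contains c) || pvAlphalist.contains c || pvNumlist.contains c then
        false
      else
        userCheckLoopA rest

def user_check (user_val : String) : Bool := userCheckLoopA user_val.toList

-- ===== PORT B =====
-- if not user_val: return True
-- return 'a' <= min(user_val) and max(user_val) <= 'z'
def user_check_alt (user_val : String) : Bool :=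
  if user_val.toList = [] then true
  else
    match PySem.List.min? user_val.toList (fun c => c),
          PySem.List.max? user_val.toList (fun c => c) with
    | some mn, some mx => decide ('a' ≤ mn) && decide (mx ≤ 'z')
    | _, _ => true

-- ===== PRECONDITION & SPEC =====
def Spec_user_check (user_val : String) (out : Bool) : Prop := out = user_check_alt user_val
instance (user_val : String) (out : Bool) : Decidable (Spec_user_check user_val out) := by unfold Spec_user_check; infer_instance

-- ===== CLAIM (what is proved, stated in full; the proofs are below) =====
def Claim_equal_user_check : Prop := ∀ (user_val : String), Dom_user_check user_val → Spec_user_check user_val (user_check user_val)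

-- ===== LEMMAS AND PROOFS =====

-- membership in the lowercase list is exactly the interval 'a'..'z'
theorem mem_lower_iff (c : Char) : (c ∈ pvAlphalist2) ↔ ('a' ≤ c ∧ c ≤ 'z') := by
  simp [pvAlphalist2, Char.le_def, Char.ext_iff, UInt32.le_iff_toNat_le, UInt32.ext_iff]
  omega

-- a lowercase letter is neither an uppercase letter nor a digit
theorem lower_not_upper_num (c : Char) (h : c ∈ pvAlphalist2) :
    c ∉ pvAlphalist ∧ c ∉ pvNumlist := by
  fin_cases h <;> decide

-- A's loop decides "every character is a lowercase letter"
theorem loopA_eq_all (cs : List Char) :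
    userCheckLoopA cs = true ↔ ∀ c ∈ cs, c ∈ pvAlphalist2 := by
  induction cs with
  | nil => simp [userCheckLoopA]
  | cons c rest ih =>
      simp only [userCheckLoopA]
      by_cases h : c ∈ pvAlphalist2
      · obtain ⟨h1, h2⟩ := lower_not_upper_num c h
        simp [h, h1, h2, ih]
      · simp [h]

-- B's min/max interval test decides the same property on nonempty lists
theorem alt_eq_all (cs : List Char) (mn mx : Char)
    (hmn : PySem.List.min? cs (fun c => c) = some mn)
    (hmx : PySem.List.max? cs (fun c => c) = some mx) :
    (decide ('a' ≤ mn) && decide (mx ≤ 'z')) = true ↔ ∀ c ∈ cs, c ∈ pvAlphalist2 := by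
  simp only [Bool.and_eq_true, decide_eq_true_eq]
  constructor
  · rintro ⟨h1, h2⟩ c hc
    rw [mem_lower_iff]
    exact ⟨le_trans h1 (PySem.List.min?_isMin hmn c hc),
           le_trans (PySem.List.max?_isMax hmx c hc) h2⟩
  · intro h
    have h1 := (mem_lower_iff mn).1 (h mn (PySem.List.min?_mem hmn))
    have h2 := (mem_lower_iff mx).1 (h mx (PySem.List.max?_mem hmx))
    exact ⟨h1.1, h2.2⟩

-- ===== VERDICT (by name: the statement is the Claim_ definition above) =====
theorem user_check_spec : Claim_equal_user_check := by
  intro user_val _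
  unfold Spec_user_check user_check user_check_alt
  by_cases hnil : user_val.toList = []
  · simp [hnil, userCheckLoopA]
  · simp only [hnil, if_false]
    obtain ⟨mn, hmn⟩ : ∃ mn, PySem.List.min? user_val.toList (fun c => c) = some mn := by
      cases h : PySem.List.min? user_val.toList (fun c => c) with
      | none => exact absurd ((PySem.List.min?_eq_none_iff _ _).1 h) hnil
      | some m => exact ⟨m, rfl⟩
    obtain ⟨mx, hmx⟩ : ∃ mx, PySem.List.max? user_val.toList (fun c => c) = some mx := by
      cases h : PySem.List.max? user_val.toList (fun c => c) with
      | none =>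
          exact absurd ((PySem.List.max?_eq_none_iff _ _).1 h) hnil
      | some m => exact ⟨m, rfl⟩
    rw [hmn, hmx]
    show userCheckLoopA user_val.toList = (decide ('a' ≤ mn) && decide (mx ≤ 'z'))
    rcases Bool.eq_false_or_eq_true ((decide ('a' ≤ mn) && decide (mx ≤ 'z'))) with hb | hb
    · rw [hb]
      exact (loopA_eq_all _).2 ((alt_eq_all _ _ _ hmn hmx).1 hb)
    · rw [hb]
      by_contra hA
      rw [Bool.not_eq_false] at hA
      exact absurd ((alt_eq_all _ _ _ hmn hmx).2 ((loopA_eq_all _).1 hA)) (by simp [hb])
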